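-- pv_equiv track=rewrite | github.com/Hybridlo/Diploma | utils/transformers.py | transform_number_big_endian
-- ===== SOURCE A (Python) =====
-- import typing
--
-- def transform_number_big_endian(inp: typing.List[int]) -> typing.List[str]:
--     max_len = max((abs(num).bit_length() for num in inp))
--     res: typing.List[str] = []
--
--     for inp_item in inp:
--         inp_bin = bin(abs(inp_item))[2:].rjust(max_len+1, "0")
--
--         if inp_item < 0:
--             inp_bin_a = ""
--             found_1 = False
--
--             for bit in reversed(inp_bin):
--                 if bit == "0" and not found_1:
--                     inp_bin_a = bit + inp_bin_a
--
--                 elif bit == "1" and not found_1: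
--                     inp_bin_a = bit + inp_bin_a
--                     found_1 = True
--
--                 else:
--                     inp_bin_a = str(1 - int(bit)) + inp_bin_a
--
--             inp_bin = inp_bin_a
--
--         res.append(inp_bin)
--
--     return res
-- ===== SOURCE B (Python) =====
-- import typing
--
-- def transform_number_big_endian(inp: typing.List[int]) -> typing.List[str]:
--     w = max(abs(num).bit_length() for num in inp) + 1
--     m = 1 << w
--     return [format(num % m, '0{}b'.format(w)) for num in inp]
-- ===== Notes on version B (the rewrite author's own statement) =====
-- stated objective: simpler
-- what changed: B replaces A's per-item sign branch and inner reversed per-bit complement scan by one uniform pass that formats num % (1 << w) as a zero-padded width-w binary string, using modular arithmetic to get the two's-complement pattern in closed form.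
import Mathlib
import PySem

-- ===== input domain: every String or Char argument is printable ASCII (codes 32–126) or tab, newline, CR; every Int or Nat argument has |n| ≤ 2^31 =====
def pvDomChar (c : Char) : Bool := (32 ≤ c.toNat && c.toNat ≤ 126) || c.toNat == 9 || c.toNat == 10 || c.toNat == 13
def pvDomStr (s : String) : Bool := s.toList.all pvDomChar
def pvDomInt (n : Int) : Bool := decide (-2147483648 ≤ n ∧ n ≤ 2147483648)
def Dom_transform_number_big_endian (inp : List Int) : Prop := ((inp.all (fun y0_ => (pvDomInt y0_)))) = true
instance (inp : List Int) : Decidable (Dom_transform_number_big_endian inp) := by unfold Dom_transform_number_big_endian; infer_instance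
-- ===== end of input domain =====

-- B replaces A's sign branch and per-bit complement scan by one uniform masking pass
-- (format(num % (1 << w), '0wb')); objective: simpler. Equivalence on nonempty input.

-- ===== PORT A =====

-- abs(num).bit_length()
def pvBitLen (n : Nat) : Nat :=
  if n = 0 then 0 else pvBitLen (n / 2) + 1
decreasing_by exact Nat.div_lt_self (Nat.pos_of_ne_zero (by assumption)) (by omega)

-- bin(n)[2:] for n ≥ 1 (digits of n, big-endian); pvBin adds Python's "0" for n = 0
def pvBinGo (n : Nat) : List Char :=
  if n = 0 then [] else pvBinGo (n / 2) ++ [if n % 2 = 1 then '1' else '0']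
decreasing_by exact Nat.div_lt_self (Nat.pos_of_ne_zero (by assumption)) (by omega)

def pvBin (n : Nat) : List Char := if n = 0 then ['0'] else pvBinGo n

-- s.rjust(w, "0")  (w ≥ length always holds at the call sites)
def pvRjust (w : Nat) (s : List Char) : List Char := List.replicate (w - s.length) '0' ++ s

-- the body of A's inner 'for bit in reversed(inp_bin)' loop; state = (inp_bin_a, found_1)
def pvStepA (st : List Char × Bool) (bit : Char) : List Char × Bool :=
  if bit = '0' ∧ st.2 = false then (bit :: st.1, st.2)
  else if bit = '1' ∧ st.2 = false then (bit :: st.1, true)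
  -- str(1 - int(bit)) : bits here are only '0'/'1'
  else ((if bit = '1' then '0' else '1') :: st.1, st.2)

-- one iteration of A's outer loop (maxLen fixed)
def pvProcA (maxLen : Nat) (item : Int) : String :=
  -- inp_bin = bin(abs(inp_item))[2:].rjust(max_len+1, "0")
  if item < 0 then
    String.mk (((pvRjust (maxLen + 1) (pvBin item.natAbs)).reverse.foldl pvStepA ([], false)).1)
  else String.mk (pvRjust (maxLen + 1) (pvBin item.natAbs))

def transform_number_big_endian (inp : List Int) : List String :=
  match inp with
  | [] => []   -- Python: max() raises ValueError here; excluded by Pre_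
  | x :: xs =>
    let maxLen := xs.foldl (fun m y => max m (pvBitLen y.natAbs)) (pvBitLen x.natAbs)
    inp.foldl (fun res item => res ++ [pvProcA maxLen item]) []

-- ===== PORT B =====

def transform_number_big_endian_alt (inp : List Int) : List String :=
  match inp with
  | [] => []   -- Python: max() raises ValueError here; excluded by Pre_
  | x :: xs =>
    let w := xs.foldl (fun m y => max m (pvBitLen y.natAbs)) (pvBitLen x.natAbs) + 1
    -- format(num % (1 << w), '0{w}b') : binary of the nonnegative residue, zero-padded to width w
    inp.map (fun num => String.mk (pvRjust w (pvBin (num % ((2 : Int) ^ w)).toNat)))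

-- ===== PRECONDITION & SPEC =====
-- Pre_ excludes only the empty list, on which Python's max() (in both A and B) raises ValueError.
def Pre_transform_number_big_endian (inp : List Int) : Prop := inp ≠ []
instance (inp : List Int) : Decidable (Pre_transform_number_big_endian inp) := by
  unfold Pre_transform_number_big_endian; infer_instance

def pvWitness_transform_number_big_endian : List Int := ([3, -5, 0])

def Spec_transform_number_big_endian (inp : List Int) (out : List String) : Prop := out = transform_number_big_endian_alt inp
instance (inp : List Int) (out : List String) : Decidable (Spec_transform_number_big_endian inp out) := by unfold Spec_transform_number_big_endian; infer_instance

-- ===== CLAIM (what is proved, stated in full; the proofs are below) =====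
def Claim_equal_transform_number_big_endian : Prop := ∀ (inp : List Int), Dom_transform_number_big_endian inp → Pre_transform_number_big_endian inp → Spec_transform_number_big_endian inp (transform_number_big_endian inp)

-- ===== LEMMAS AND PROOFS =====

-- LSB-first bits of a in width w
def bitsLE : Nat → Nat → List Char
  | 0, _ => []
  | w + 1, a => (if a % 2 = 1 then '1' else '0') :: bitsLE w (a / 2)

theorem bitsLE_zero (w : Nat) : bitsLE w 0 = List.replicate w '0' := by
  induction w with
  | zero => rfl
  | succ w ih => simp [bitsLE, ih, List.replicate_succ]

theorem pvBitLen_lt (a : Nat) : a < 2 ^ pvBitLen a := by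
  induction a using Nat.strong_induction_on with
  | _ a ih =>
    unfold pvBitLen
    split
    · simp [*]
    · rename_i h
      have h2 := ih (a / 2) (Nat.div_lt_self (Nat.pos_of_ne_zero h) (by omega))
      have : 2 ^ (pvBitLen (a / 2) + 1) = 2 * 2 ^ pvBitLen (a / 2) := by ring
      omega

theorem pvBitLen_le (a w : Nat) (h : a < 2 ^ w) : pvBitLen a ≤ w := by
  induction a using Nat.strong_induction_on generalizing w with
  | _ a ih =>
    unfold pvBitLen
    split
    · omega
    · rename_i hne
      have hw : w ≠ 0 := by
        intro hw0; subst hw0; simp at h; omega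
      have hstep : 2 ^ w = 2 ^ (w - 1) * 2 := by
        conv_lhs => rw [show w = (w - 1) + 1 by omega]
        rw [pow_succ]
      have := ih (a / 2) (Nat.div_lt_self (Nat.pos_of_ne_zero hne) (by omega)) (w - 1) (by omega)
      omega

theorem length_bitsLE (w a : Nat) : (bitsLE w a).length = w := by
  induction w generalizing a with
  | zero => rfl
  | succ w ih => simp [bitsLE, ih]

theorem pvBinGo_eq (a : Nat) : pvBinGo a = (bitsLE (pvBitLen a) a).reverse := by
  induction a using Nat.strong_induction_on with
  | _ a ih =>
    unfold pvBinGo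
    split
    · rename_i h; subst h; simp [pvBitLen, bitsLE]
    · rename_i h
      have hb : pvBitLen a = pvBitLen (a / 2) + 1 := by
        conv_lhs => unfold pvBitLen
        simp [h]
      rw [ih (a / 2) (Nat.div_lt_self (Nat.pos_of_ne_zero h) (by omega)), hb]
      rw [show bitsLE (pvBitLen (a / 2) + 1) a
            = (if a % 2 = 1 then '1' else '0') :: bitsLE (pvBitLen (a / 2)) (a / 2) from rfl]
      simp

theorem bitsLE_top (w a : Nat) (h : a < 2 ^ w) : bitsLE (w + 1) a = bitsLE w a ++ ['0'] := by
  induction w generalizing a with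
  | zero =>
    interval_cases a
    rfl
  | succ w ih =>
    have h2 : a / 2 < 2 ^ w := by
      have : 2 ^ (w + 1) = 2 * 2 ^ w := by ring
      omega
    rw [show bitsLE (w + 1 + 1) a
          = (if a % 2 = 1 then '1' else '0') :: bitsLE (w + 1) (a / 2) from rfl,
        ih _ h2,
        show bitsLE (w + 1) a
          = (if a % 2 = 1 then '1' else '0') :: bitsLE w (a / 2) from rfl]
    simp

theorem bitsLE_pad (m k a : Nat) (h : a < 2 ^ m) :
    bitsLE (m + k) a = bitsLE m a ++ List.replicate k '0' := by
  induction k with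
  | zero => simp
  | succ k ih =>
    have : m + (k + 1) = (m + k) + 1 := by omega
    rw [this, bitsLE_top _ _ (lt_of_lt_of_le h (Nat.pow_le_pow_right (by omega) (by omega))), ih]
    simp [List.replicate_succ']

theorem rjust_pvBin (w a : Nat) (hw : 1 ≤ w) (h : a < 2 ^ w) :
    pvRjust w (pvBin a) = (bitsLE w a).reverse := by
  obtain ⟨n, rfl⟩ : ∃ n, w = n + 1 := ⟨w - 1, by omega⟩
  unfold pvRjust pvBin
  split
  · rename_i h0; subst h0
    rw [bitsLE_zero]
    simp [List.replicate_succ']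
    rw [← List.replicate_succ', List.replicate_succ]
  · rename_i h0
    have hle : pvBitLen a ≤ n + 1 := pvBitLen_le a (n + 1) h
    rw [pvBinGo_eq]
    simp only [List.length_reverse, length_bitsLE]
    conv_rhs =>
      rw [show n + 1 = pvBitLen a + (n + 1 - pvBitLen a) by omega,
          bitsLE_pad _ _ _ (pvBitLen_lt a)]
    simp

def pvFlip (c : Char) : Char := if c = '1' then '0' else '1'

def pvBinChars (l : List Char) : Prop := ∀ c ∈ l, c = '0' ∨ c = '1'

theorem bitsLE_binChars (w a : Nat) : pvBinChars (bitsLE w a) := by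
  induction w generalizing a with
  | zero => intro c hc; simp [bitsLE] at hc
  | succ w ih =>
    intro c hc
    simp [bitsLE] at hc
    rcases hc with hc | hc
    · split at hc <;> simp [hc]
    · exact ih _ c hc

-- the nice form of the inner loop: copy up to and including the first '1', flip the rest
def pvTw : List Char → List Char
  | [] => []
  | b :: rest => if b = '1' then b :: rest.map pvFlip else b :: pvTw rest

theorem foldl_stepA_true (l : List Char) (acc : List Char) (hb : pvBinChars l) :
    l.foldl pvStepA (acc, true) = ((l.map pvFlip).reverse ++ acc, true) := by
  induction l generalizing acc with
  | nil => simp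
  | cons b rest ih =>
    have hbr : pvBinChars rest := fun c hc => hb c (by simp [hc])
    have hb0 := hb b (by simp)
    rcases hb0 with h | h <;>
      simp [List.foldl, pvStepA, h, pvFlip, ih _ hbr]

theorem foldl_stepA_false (l : List Char) (acc : List Char) (hb : pvBinChars l) :
    l.foldl pvStepA (acc, false) = ((pvTw l).reverse ++ acc, l.any (· = '1')) := by
  induction l generalizing acc with
  | nil => simp [pvTw]
  | cons b rest ih =>
    have hbr : pvBinChars rest := fun c hc => hb c (by simp [hc])
    rcases hb b (by simp) with h | h
    · subst h
      simp [List.foldl, pvStepA, pvTw, ih _ hbr]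
    · subst h
      simp [List.foldl, pvStepA, pvTw, foldl_stepA_true rest _ hbr]

theorem map_flip_bitsLE (w m : Nat) (h : m < 2 ^ w) :
    (bitsLE w m).map pvFlip = bitsLE w (2 ^ w - 1 - m) := by
  induction w generalizing m with
  | zero => simp [bitsLE]
  | succ w ih =>
    have h2 : 2 ^ (w + 1) = 2 * 2 ^ w := by ring
    have hq : m / 2 < 2 ^ w := by omega
    have e1 : (2 ^ (w + 1) - 1 - m) % 2 = 1 - m % 2 := by omega
    have e2 : (2 ^ (w + 1) - 1 - m) / 2 = 2 ^ w - 1 - m / 2 := by omega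
    simp only [bitsLE, List.map, ih _ hq, e1, e2]
    congr 1
    rcases Nat.mod_two_eq_zero_or_one m with hm | hm <;> simp [hm, pvFlip]

theorem pvTw_bitsLE (w a : Nat) (h0 : 0 < a) (h : a < 2 ^ w) :
    pvTw (bitsLE w a) = bitsLE w (2 ^ w - a) := by
  induction w generalizing a with
  | zero => omega
  | succ w ih =>
    have h2 : 2 ^ (w + 1) = 2 * 2 ^ w := by ring
    have hq : a / 2 < 2 ^ w := by omega
    rcases Nat.mod_two_eq_zero_or_one a with hm | hm
    · -- a even, a > 0
      have e1 : ¬ ((2 ^ (w + 1) - a) % 2 = 1) := by omega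
      have e2 : (2 ^ (w + 1) - a) / 2 = 2 ^ w - a / 2 := by omega
      have hm' : ¬ (a % 2 = 1) := by omega
      simp only [bitsLE, e2, if_neg hm', if_neg e1]
      rw [pvTw]
      simp [ih (a / 2) (by omega) hq]
    · -- a odd
      have e1 : (2 ^ (w + 1) - a) % 2 = 1 := by omega
      have e2 : (2 ^ (w + 1) - a) / 2 = 2 ^ w - 1 - a / 2 := by omega
      simp only [bitsLE, e1, e2, hm, if_true]
      rw [pvTw]
      simp [map_flip_bitsLE w (a / 2) hq]

-- per-element equality, under the bound the running max guarantees
theorem procA_eq (m : Nat) (item : Int) (hb : pvBitLen item.natAbs ≤ m) :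
    pvProcA m item
      = String.mk (pvRjust (m + 1) (pvBin (item % ((2 : Int) ^ (m + 1))).toNat)) := by
  have habs : (item.natAbs : Nat) < 2 ^ (m + 1) :=
    lt_of_lt_of_le (pvBitLen_lt _) (Nat.pow_le_pow_right (by omega) (by omega))
  have hcast : ((2 : Int) ^ (m + 1)) = ((2 ^ (m + 1) : Nat) : Int) := by push_cast; ring
  unfold pvProcA
  split
  · rename_i hneg
    have ha0 : 0 < item.natAbs := by omega
    have habs' : (item.natAbs : Int) < ((2 ^ (m + 1) : Nat) : Int) := by exact_mod_cast habs
    have hmod : item % ((2 : Int) ^ (m + 1)) = ((2 ^ (m + 1) - item.natAbs : Nat) : Int) := by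
      rw [hcast]
      have h1 : item % ((2 ^ (m + 1) : Nat) : Int)
          = (item + ((2 ^ (m + 1) : Nat) : Int) * 1) % ((2 ^ (m + 1) : Nat) : Int) := by
        rw [Int.add_mul_emod_self_left]
      rw [h1, Int.emod_eq_of_lt (by omega) (by omega)]
      push_cast
      omega
    rw [hmod]
    have htn : (((2 ^ (m + 1) - item.natAbs : Nat) : Int)).toNat = 2 ^ (m + 1) - item.natAbs := by
      omega
    rw [htn]
    rw [rjust_pvBin (m + 1) item.natAbs (by omega) habs,
        rjust_pvBin (m + 1) _ (by omega) (by omega)]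
    rw [List.reverse_reverse,
        foldl_stepA_false _ _ (bitsLE_binChars _ _),
        pvTw_bitsLE (m + 1) item.natAbs ha0 habs]
    simp
  · rename_i hpos
    have hmod : item % ((2 : Int) ^ (m + 1)) = item := by
      apply Int.emod_eq_of_lt (by omega)
      rw [hcast]
      omega
    rw [hmod]
    congr 3
    omega

-- A's result foldl is a map
theorem foldl_append_map {α β : Type} (f : α → β) (l : List α) (acc : List β) :
    l.foldl (fun res item => res ++ [f item]) acc = acc ++ l.map f := by
  induction l generalizing acc with
  | nil => simp
  | cons x xs ih => simp [List.foldl, ih]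

-- ===== VERDICT (by name: the statement is the Claim_ definition above) =====
theorem transform_number_big_endian_spec : Claim_equal_transform_number_big_endian := by
  unfold Claim_equal_transform_number_big_endian
  intro inp _ hpre
  unfold Spec_transform_number_big_endian
  cases inp with
  | nil => exact absurd rfl hpre
  | cons x xs =>
    unfold transform_number_big_endian transform_number_big_endian_alt
    simp only []
    rw [foldl_append_map]
    simp only [List.nil_append]
    apply List.map_congr_left
    intro y hy
    have hmax := PySem.List.le_foldl_max_nat xs (fun z => pvBitLen z.natAbs) (pvBitLen x.natAbs)
    have hbnd : pvBitLen y.natAbs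
        ≤ xs.foldl (fun m z => max m (pvBitLen z.natAbs)) (pvBitLen x.natAbs) := by
      rcases List.mem_cons.mp hy with h | h
      · subst h; exact hmax.1
      · exact hmax.2 y h
    exact procA_eq _ y hbnd
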